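-- pv_equiv track=rewrite | github.com/Romathonat/RocketLeagueSkillsDetection | seqehc/utils.py | get_support_from_vector
-- ===== SOURCE A (Python) =====
-- import math
--
-- def hamming_weight(vector):
--     w = 0
--     while vector:
--         w += 1
--         vector &= vector - 1
--     return w
--
-- def get_support_from_vector(bitset, bitset_slot_size, first_zero_mask,
--                             last_ones_mask):
--     temp = bitset >> 1
--     temp = temp & first_zero_mask
--
--     bitset |= temp
--
--     temp = bitset
--
--     for i in range(bitset_slot_size - 1):
--         temp = temp >> 1
--         temp = temp & first_zero_mask
--         bitset |= temp
--
--     bitset = bitset & last_ones_mask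
--
--     i = bitset.bit_length()
--
--     data_length = math.ceil(i / bitset_slot_size)
--
--     bitset_simple = 0
--     count = 0
--
--     while i > 0:
--         if bitset >> (i - 1) & 1:
--             bitset_simple |= 1 << (data_length - count - 1)
--
--         count += 1
--         i -= bitset_slot_size
--
--     # now we have a vector with ones or 0 at the end of each slot. We just need to
--     # compute the hamming distance
--     return hamming_weight(bitset_simple), bitset_simple
-- ===== SOURCE B (Python) =====
-- def get_support_from_vector(bitset, bitset_slot_size, first_zero_mask,
--                             last_ones_mask):
--     s = bitset_slot_size
--     # Phase 1: smear each bit downward through first_zero_mask by binary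
--     # doubling: apply shift chunks 1, 2, 4, ... while they still fit into s,
--     # squaring the propagate mask alongside, ...
--     r = bitset
--     md = first_zero_mask          # propagate mask for a chunk shift of d
--     cov = 0
--     d = 1
--     while cov + d <= s:
--         r |= (r >> d) & md
--         cov += d
--         md &= md >> d
--         d <<= 1
--     # ... then compose the propagate mask for the remaining chunk size from
--     # power-of-two masks (M[a+b] = (M[a] >> b) & M[b]) and apply it once.
--     rem = s - cov
--     if rem > 0:
--         md = first_zero_mask
--         dd = 1
--         mrem = -1
--         shift = 0
--         while rem > 0:
--             if rem & 1:
--                 mrem &= md >> shift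
--                 shift += dd
--             rem >>= 1
--             if rem > 0:
--                 md &= md >> dd
--                 dd <<= 1
--         r |= (r >> shift) & mrem
--     # Phase 2: keep the slot anchors, then consume the word slot by slot from
--     # the bottom, collecting one flag bit per slot.
--     v = r & last_ones_mask
--     n = v.bit_length()
--     if n == 0:
--         return 0, 0
--     slots = (n + s - 1) // s
--     w = v >> ((n - 1) % s)
--     simple = 0
--     for t in range(slots):
--         if w & 1:
--             simple |= 1 << t
--         w >>= s
--     return bin(simple).count("1"), simple
-- ===== Notes on version B (the rewrite author's own statement) =====
-- stated objective: faster
-- what changed: B replaces A's linear slot_size-step temp-chain smear by binary doubling of shift chunks with mask squaring plus one composed remainder chunk (O(log slot_size) big-int ops), and replaces A's float-ceil, top-down per-bit while-loop and separate Kernighan popcount by integer ceiling division and one bottom-up pass that consumes the word slot by slot, finishing with a library popcount.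
import Mathlib
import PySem

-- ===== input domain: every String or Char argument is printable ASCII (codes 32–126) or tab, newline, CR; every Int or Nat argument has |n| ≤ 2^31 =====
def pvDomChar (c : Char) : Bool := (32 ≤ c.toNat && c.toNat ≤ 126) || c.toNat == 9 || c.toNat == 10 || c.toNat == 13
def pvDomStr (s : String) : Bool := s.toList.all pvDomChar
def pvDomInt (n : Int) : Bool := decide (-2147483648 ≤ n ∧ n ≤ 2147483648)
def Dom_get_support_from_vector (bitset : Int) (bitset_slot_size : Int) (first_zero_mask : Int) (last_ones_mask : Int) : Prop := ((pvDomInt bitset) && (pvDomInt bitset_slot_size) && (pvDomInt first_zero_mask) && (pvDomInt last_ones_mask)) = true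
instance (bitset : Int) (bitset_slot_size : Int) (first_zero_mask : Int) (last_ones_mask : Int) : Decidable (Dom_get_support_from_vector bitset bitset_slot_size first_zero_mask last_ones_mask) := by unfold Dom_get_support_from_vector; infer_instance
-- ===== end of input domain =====

-- B replaces A's linear (slot_size-step) mask-smearing chain by binary doubling of shift chunks
-- with mask squaring, and A's top-down per-bit extraction walk plus separate Kernighan popcount
-- loop by one bottom-up pass that consumes the word slot by slot, with a library popcount
-- (objective: faster — exponentially fewer big-int operations in bitset_slot_size).

-- ===== PORT A =====

-- A's helper hamming_weight: 'w = 0; while vector: w += 1; vector &= vector - 1'.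
-- Fuel recursion; fuel = vector.toNat bounds the iteration count for the nonnegative
-- arguments A feeds it.
def pvHwA : Nat → Int → Int
  | 0, _ => 0
  | f + 1, v => if v ≠ 0 then 1 + pvHwA f (PySem.Int.band v (v - 1)) else 0

-- A's extraction loop: 'while i > 0: if bitset >> (i-1) & 1: simple |= 1 << (dl-count-1); count += 1; i -= s'.
-- Fuel bounds the iterations; (i-1).toNat and (dl-count-1).toNat are exact for the
-- nonnegative shift counts reached under Pre_ (s ≥ 1).
def pvLoopA (v s dl : Int) : Nat → Int → Int → Int → Int × Int
  | 0, _, count, simple => (simple, count)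
  | f + 1, i, count, simple =>
      if i > 0 then
        let simple' :=
          if PySem.Int.band (v >>> (i - 1).toNat) 1 ≠ 0 then
            PySem.Int.bor simple ((1 <<< (dl - count - 1).toNat : Nat) : Int)
          else simple
        pvLoopA v s dl f (i - s) (count + 1) simple'
      else (simple, count)

def get_support_from_vector (bitset : Int) (bitset_slot_size : Int) (first_zero_mask : Int) (last_ones_mask : Int) : List Int :=
  let temp0 := PySem.Int.band (bitset >>> (1 : Nat)) first_zero_mask
  let b1 := PySem.Int.bor bitset temp0
  -- 'for i in range(bitset_slot_size - 1): temp = temp >> 1; temp = temp & fzm; bitset |= temp'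
  let st := (PySem.List.pyRange 0 (bitset_slot_size - 1) 1).foldl
      (fun (st : Int × Int) _ =>
        let t := PySem.Int.band (st.1 >>> (1 : Nat)) first_zero_mask
        (t, PySem.Int.bor st.2 t)) (b1, b1)
  let masked := PySem.Int.band st.2 last_ones_mask
  let i : Int := ((PySem.Int.bitLength masked : Nat) : Int)
  -- math.ceil(i / s): exact integer ceiling for the s ≥ 1 (Pre_) and small i that occur
  let dl : Int := -(PySem.Int.floordiv (-i) bitset_slot_size)
  let res := pvLoopA masked bitset_slot_size dl i.toNat i 0 0
  [pvHwA res.1.toNat res.1, res.1]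

-- ===== PORT B =====

-- B's doubling loop: 'while cov + d <= s: r |= (r >> d) & md; cov += d; md &= md >> d; d <<= 1'.
-- State (r, md, cov, d); fuel bounds the iteration count (d doubles every round).
def pvDbl (s : Int) : Nat → Int × Int × Int × Int → Int × Int × Int × Int
  | 0, st => st
  | f + 1, (r, md, cov, d) =>
      if cov + d ≤ s then
        pvDbl s f (PySem.Int.bor r (PySem.Int.band (r >>> d.toNat) md),
                   PySem.Int.band md (md >>> d.toNat), cov + d, d <<< (1 : Nat))
      else (r, md, cov, d)

-- B's remainder-mask loop: 'while rem > 0: if rem & 1: mrem &= md >> shift; shift += dd;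
-- rem >>= 1; if rem > 0: md &= md >> dd; dd <<= 1'.  Returns (mrem, shift).
def pvRem : Nat → Int → Int → Int → Int → Int → Int × Int
  | 0, _, _, _, mrem, shift => (mrem, shift)
  | f + 1, rem, md, dd, mrem, shift =>
      if rem > 0 then
        let p := if PySem.Int.band rem 1 ≠ 0 then
                   (PySem.Int.band mrem (md >>> shift.toNat), shift + dd)
                 else (mrem, shift)
        let rem' := rem >>> (1 : Nat)
        if rem' > 0 then
          pvRem f rem' (PySem.Int.band md (md >>> dd.toNat)) (dd <<< (1 : Nat)) p.1 p.2
        else p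
      else (mrem, shift)

def get_support_from_vector_alt (bitset : Int) (bitset_slot_size : Int) (first_zero_mask : Int) (last_ones_mask : Int) : List Int :=
  let st := pvDbl bitset_slot_size (bitset_slot_size.toNat + 1) (bitset, first_zero_mask, 0, 1)
  let rem := bitset_slot_size - st.2.2.1
  let r :=
    if rem > 0 then
      let p := pvRem (rem.toNat + 1) rem first_zero_mask 1 (-1) 0
      PySem.Int.bor st.1 (PySem.Int.band (st.1 >>> p.2.toNat) p.1)
    else st.1
  let v := PySem.Int.band r last_ones_mask
  let n := PySem.Int.bitLength v
  if n = 0 then [0, 0]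
  else
    let slots := PySem.Int.floordiv ((n : Int) + bitset_slot_size - 1) bitset_slot_size
    let w0 := v >>> (PySem.Int.mod ((n : Int) - 1) bitset_slot_size).toNat
    -- 'for t in range(slots): if w & 1: simple |= 1 << t; w >>= s'
    let fin := (PySem.List.pyRange 0 slots 1).foldl
      (fun (st : Int × Int) t =>
        (st.1 >>> bitset_slot_size.toNat,
         if PySem.Int.band st.1 1 ≠ 0 then PySem.Int.bor st.2 ((1 <<< t.toNat : Nat) : Int)
         else st.2))
      (w0, 0)
    -- 'bin(simple).count("1")' = popcount of the nonnegative simple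
    [((PySem.Int.bitCount fin.2 : Nat) : Int), fin.2]

-- ===== PRECONDITION & SPEC =====
-- Pre_ excludes exactly the inputs on which A raises: with bitset_slot_size ≤ 0 A's smear loop
-- never runs, and A then raises ZeroDivisionError (slot size 0: math.ceil(i/0)) or, whenever the
-- once-smeared masked bitset is nonzero, ValueError on a negative shift count; A returns (0, 0)
-- when bitset_slot_size ≤ -1 and that masked value is zero, which Pre_ admits.
def Pre_get_support_from_vector (bitset : Int) (bitset_slot_size : Int) (first_zero_mask : Int) (last_ones_mask : Int) : Prop :=
  1 ≤ bitset_slot_size ∨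
    (bitset_slot_size ≤ -1 ∧
      PySem.Int.band (PySem.Int.bor bitset (PySem.Int.band (bitset >>> (1 : Nat)) first_zero_mask)) last_ones_mask = 0)
instance (bitset : Int) (bitset_slot_size : Int) (first_zero_mask : Int) (last_ones_mask : Int) : Decidable (Pre_get_support_from_vector bitset bitset_slot_size first_zero_mask last_ones_mask) := by unfold Pre_get_support_from_vector; infer_instance

def pvWitness_get_support_from_vector : Int × Int × Int × Int := (21, 2, 2, 5)

def Spec_get_support_from_vector (bitset : Int) (bitset_slot_size : Int) (first_zero_mask : Int) (last_ones_mask : Int) (out : List Int) : Prop := out = get_support_from_vector_alt bitset bitset_slot_size first_zero_mask last_ones_mask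
instance (bitset : Int) (bitset_slot_size : Int) (first_zero_mask : Int) (last_ones_mask : Int) (out : List Int) : Decidable (Spec_get_support_from_vector bitset bitset_slot_size first_zero_mask last_ones_mask out) := by unfold Spec_get_support_from_vector; infer_instance

-- ===== CLAIM (what is proved, stated in full; the proofs are below) =====
def Claim_equal_get_support_from_vector : Prop := ∀ (bitset : Int) (bitset_slot_size : Int) (first_zero_mask : Int) (last_ones_mask : Int), Dom_get_support_from_vector bitset bitset_slot_size first_zero_mask last_ones_mask → Pre_get_support_from_vector bitset bitset_slot_size first_zero_mask last_ones_mask → Spec_get_support_from_vector bitset bitset_slot_size first_zero_mask last_ones_mask (get_support_from_vector bitset bitset_slot_size first_zero_mask last_ones_mask)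

-- ===== LEMMAS AND PROOFS =====

-- ---------- Nat helper: m - (m &&& n) is the bitwise difference ----------

theorem pv_and_mod_two (m n : Nat) : (m &&& n) % 2 = m % 2 * (n % 2) := by
  have h := Nat.testBit_and m n 0
  simp only [Nat.testBit_zero] at h
  rcases Nat.mod_two_eq_zero_or_one m with hm | hm <;>
    rcases Nat.mod_two_eq_zero_or_one n with hn | hn <;>
    rcases Nat.mod_two_eq_zero_or_one (m &&& n) with ha | ha <;>
    simp [hm, hn, ha] at h ⊢

theorem pv_ldiff_mod_two (m n : Nat) : (m.ldiff n) % 2 = m % 2 * (1 - n % 2) := by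
  have h := Nat.testBit_ldiff m n 0
  simp only [Nat.testBit_zero] at h
  rcases Nat.mod_two_eq_zero_or_one m with hm | hm <;>
    rcases Nat.mod_two_eq_zero_or_one n with hn | hn <;>
    rcases Nat.mod_two_eq_zero_or_one (m.ldiff n) with ha | ha <;>
    simp [hm, hn, ha] at h ⊢

theorem pv_ldiff_div_two (m n : Nat) : (m.ldiff n) / 2 = (m / 2).ldiff (n / 2) := by
  apply Nat.eq_of_testBit_eq; intro i
  simp [Nat.testBit_div_two, Nat.testBit_ldiff]

theorem pv_nat_sub_and (m n : Nat) : m - (m &&& n) = m.ldiff n := by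
  induction m using Nat.strong_induction_on generalizing n with
  | _ m ih =>
    match m with
    | 0 =>
      apply Nat.eq_of_testBit_eq; intro i
      simp [Nat.testBit_ldiff]
    | Nat.succ m' =>
      set m := Nat.succ m' with hm
      have ihh : m / 2 - (m / 2 &&& n / 2) = (m / 2).ldiff (n / 2) :=
        ih (m / 2) (by omega) (n / 2)
      have hdm := Nat.div_add_mod m 2
      have hda := Nat.div_add_mod (m &&& n) 2
      have hdl := Nat.div_add_mod (m.ldiff n) 2
      have h1 := pv_and_mod_two m n
      have h2 := pv_ldiff_mod_two m n
      have h3 : (m &&& n) / 2 = m / 2 &&& n / 2 := Nat.and_div_two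
      have h4 := pv_ldiff_div_two m n
      have h5 : m / 2 &&& n / 2 ≤ m / 2 := Nat.and_le_left
      rcases Nat.mod_two_eq_zero_or_one n with hn2 | hn2 <;>
        rcases Nat.mod_two_eq_zero_or_one m with hm2 | hm2 <;>
        rw [hn2, hm2] at h1 h2 <;> omega

-- ---------- Int bit toolkit: testBit view of PySem band/bor and >>> ----------

theorem pv_tb_band (a b : Int) (i : Nat) :
    (PySem.Int.band a b).testBit i = (a.testBit i && b.testBit i) := by
  unfold PySem.Int.band
  match a, b with
  | Int.ofNat m, Int.ofNat n =>
    simp [Int.testBit, Nat.testBit_and]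
  | Int.ofNat m, Int.negSucc n =>
    have h1 : ¬ ((0:Int) ≤ Int.negSucc n) := by rw [Int.negSucc_eq]; omega
    have h2 : (-(Int.negSucc n) - 1).toNat = n := by rw [Int.negSucc_eq]; omega
    have h0 : ((0:Int) ≤ Int.ofNat m) := Int.natCast_nonneg m
    have h3 : (Int.ofNat m).toNat = m := rfl
    simp only [h0, h1, if_true, if_false, h2, h3, pv_nat_sub_and]
    simp [Int.testBit, Nat.testBit_ldiff]
  | Int.negSucc m, Int.ofNat n =>
    have h1 : ¬ ((0:Int) ≤ Int.negSucc m) := by rw [Int.negSucc_eq]; omega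
    have h2 : (-(Int.negSucc m) - 1).toNat = m := by rw [Int.negSucc_eq]; omega
    have h0 : ((0:Int) ≤ Int.ofNat n) := Int.natCast_nonneg n
    have h3 : (Int.ofNat n).toNat = n := rfl
    simp only [h0, h1, if_true, if_false, h2, h3, pv_nat_sub_and]
    simp [Int.testBit, Nat.testBit_ldiff, Bool.and_comm]
  | Int.negSucc m, Int.negSucc n =>
    have h1 : ¬ ((0:Int) ≤ Int.negSucc m) := by rw [Int.negSucc_eq]; omega
    have h1' : ¬ ((0:Int) ≤ Int.negSucc n) := by rw [Int.negSucc_eq]; omega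
    have h2 : (-(Int.negSucc m) - 1).toNat = m := by rw [Int.negSucc_eq]; omega
    have h2' : (-(Int.negSucc n) - 1).toNat = n := by rw [Int.negSucc_eq]; omega
    have h4 : (-(((m ||| n : Nat)) : Int) - 1) = Int.negSucc (m ||| n) := by
      rw [Int.negSucc_eq]; omega
    simp only [h1, h1', if_false, h2, h2', h4]
    simp [Int.testBit, Nat.testBit_or]

theorem pv_tb_bor (a b : Int) (i : Nat) :
    (PySem.Int.bor a b).testBit i = (a.testBit i || b.testBit i) := by
  unfold PySem.Int.bor
  match a, b with
  | Int.ofNat m, Int.ofNat n =>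
    simp [Int.testBit, Nat.testBit_or]
  | Int.ofNat m, Int.negSucc n =>
    have h1 : ¬ ((0:Int) ≤ Int.negSucc n) := by rw [Int.negSucc_eq]; omega
    have h2 : (-(Int.negSucc n) - 1).toNat = n := by rw [Int.negSucc_eq]; omega
    have h0 : ((0:Int) ≤ Int.ofNat m) := Int.natCast_nonneg m
    have h3 : (Int.ofNat m).toNat = m := rfl
    have h4 : (-(((n.ldiff m : Nat)) : Int) - 1) = Int.negSucc (n.ldiff m) := by
      rw [Int.negSucc_eq]; omega
    simp only [h0, h1, if_true, if_false, h2, h3, pv_nat_sub_and, h4]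
    simp [Int.testBit, Nat.testBit_ldiff, Bool.or_comm]
  | Int.negSucc m, Int.ofNat n =>
    have h1 : ¬ ((0:Int) ≤ Int.negSucc m) := by rw [Int.negSucc_eq]; omega
    have h2 : (-(Int.negSucc m) - 1).toNat = m := by rw [Int.negSucc_eq]; omega
    have h0 : ((0:Int) ≤ Int.ofNat n) := Int.natCast_nonneg n
    have h3 : (Int.ofNat n).toNat = n := rfl
    have h4 : (-(((m.ldiff n : Nat)) : Int) - 1) = Int.negSucc (m.ldiff n) := by
      rw [Int.negSucc_eq]; omega
    simp only [h0, h1, if_true, if_false, h2, h3, pv_nat_sub_and, h4]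
    simp [Int.testBit, Nat.testBit_ldiff]
  | Int.negSucc m, Int.negSucc n =>
    have h1 : ¬ ((0:Int) ≤ Int.negSucc m) := by rw [Int.negSucc_eq]; omega
    have h1' : ¬ ((0:Int) ≤ Int.negSucc n) := by rw [Int.negSucc_eq]; omega
    have h2 : (-(Int.negSucc m) - 1).toNat = m := by rw [Int.negSucc_eq]; omega
    have h2' : (-(Int.negSucc n) - 1).toNat = n := by rw [Int.negSucc_eq]; omega
    have h4 : (-(((m &&& n : Nat)) : Int) - 1) = Int.negSucc (m &&& n) := by
      rw [Int.negSucc_eq]; omega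
    simp only [h1, h1', if_false, h2, h2', h4]
    simp [Int.testBit, Nat.testBit_and]

theorem pv_tb_shiftRight (a : Int) (n i : Nat) :
    (a >>> n).testBit i = a.testBit (n + i) := by
  match a with
  | Int.ofNat m =>
    have h : (Int.ofNat m) >>> n = Int.ofNat (m >>> n) := rfl
    rw [h]
    simp [Int.testBit, Nat.shiftRight_eq_div_pow, Nat.testBit_div_two_pow, Nat.add_comm]
  | Int.negSucc m =>
    have h : (Int.negSucc m) >>> n = Int.negSucc (m >>> n) := rfl
    rw [h]
    simp [Int.testBit, Nat.shiftRight_eq_div_pow, Nat.testBit_div_two_pow, Nat.add_comm]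

theorem pv_tb_ext {a b : Int} (h : ∀ i, a.testBit i = b.testBit i) : a = b := by
  match a, b with
  | Int.ofNat m, Int.ofNat n =>
    congr 1
    apply Nat.eq_of_testBit_eq; intro i
    have := h i; simpa [Int.testBit] using this
  | Int.negSucc m, Int.negSucc n =>
    congr 1
    apply Nat.eq_of_testBit_eq; intro i
    have := h i; simp [Int.testBit] at this
    simpa using congrArg (!·) this
  | Int.ofNat m, Int.negSucc n =>
    exfalso
    have hi := h (max m n)
    have h1 : m.testBit (max m n) = false :=
      Nat.testBit_eq_false_of_lt (lt_of_le_of_lt (le_max_left m n) Nat.lt_two_pow_self)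
    have h2 : n.testBit (max m n) = false :=
      Nat.testBit_eq_false_of_lt (lt_of_le_of_lt (le_max_right m n) Nat.lt_two_pow_self)
    simp [Int.testBit, h1, h2] at hi
  | Int.negSucc m, Int.ofNat n =>
    exfalso
    have hi := h (max m n)
    have h1 : m.testBit (max m n) = false :=
      Nat.testBit_eq_false_of_lt (lt_of_le_of_lt (le_max_left m n) Nat.lt_two_pow_self)
    have h2 : n.testBit (max m n) = false :=
      Nat.testBit_eq_false_of_lt (lt_of_le_of_lt (le_max_right m n) Nat.lt_two_pow_self)
    simp [Int.testBit, h1, h2] at hi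

theorem pv_tb_neg_one (i : Nat) : (-1 : Int).testBit i = true := by
  show (Int.negSucc 0).testBit i = true
  simp [Int.testBit]

theorem pv_shl_one (d : Int) : d <<< (1 : Nat) = 2 * d := by
  rw [Int.shiftLeft_eq]; ring

theorem pv_shiftRight_add (a : Int) (n k : Nat) : (a >>> n) >>> k = a >>> (n + k) := by
  apply pv_tb_ext; intro i
  simp [pv_tb_shiftRight, Nat.add_assoc]

theorem pv_shr_one_nonneg (a : Int) (h : 0 ≤ a) :
    a >>> (1 : Nat) = ((a.toNat / 2 : Nat) : Int) := by
  obtain ⟨m, rfl⟩ := Int.eq_ofNat_of_zero_le h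
  show Int.ofNat (m >>> 1) = _
  rw [Nat.shiftRight_one]
  rfl

-- ---------- phase 1: bitwise characterisation of the smeared value ----------

-- 'bit i of the smear carries a source bit j above it, propagating through m'
def pvTm (x m : Int) (i j : Nat) : Prop :=
  x.testBit (i + j) = true ∧ ∀ t < j, m.testBit (i + t) = true

-- r holds, at each bit, the OR of source bits at distance ≤ c propagating through m
def pvCov (x m r : Int) (c : Nat) : Prop :=
  ∀ i, r.testBit i = true ↔ ∃ j ≤ c, pvTm x m i j

-- y is the propagate mask for a chunk shift of d
def pvMd (m y : Int) (d : Nat) : Prop :=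
  ∀ i, y.testBit i = true ↔ ∀ t < d, m.testBit (i + t) = true

theorem pvCov_refl (x m : Int) : pvCov x m x 0 := by
  intro i
  constructor
  · intro h; exact ⟨0, le_refl 0, by simpa [pvTm] using h⟩
  · rintro ⟨j, hj, hx, -⟩
    interval_cases j
    simpa using hx

theorem pvMd_neg_one (m : Int) : pvMd m (-1) 0 := by
  intro i
  simp [pv_tb_neg_one]

theorem pvMd_self (m : Int) : pvMd m m 1 := by
  intro i
  constructor
  · intro h t ht
    interval_cases t
    simpa using h
  · intro h
    simpa using h 0 (by omega)

theorem pvMd_band_shift {m y z : Int} {a b : Nat}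
    (hy : pvMd m y a) (hz : pvMd m z b) :
    pvMd m (PySem.Int.band y (z >>> a)) (a + b) := by
  intro i
  rw [pv_tb_band, pv_tb_shiftRight, Bool.and_eq_true, hy i, hz (a + i)]
  constructor
  · rintro ⟨h1, h2⟩ t ht
    by_cases hta : t < a
    · exact h1 t hta
    · have : i + t = a + i + (t - a) := by omega
      rw [this]
      exact h2 (t - a) (by omega)
  · intro h
    refine ⟨fun t ht => h t (by omega), fun t ht => ?_⟩
    have : a + i + t = i + (a + t) := by omega
    rw [this]
    exact h (a + t) (by omega)

theorem pvCov_chunk {x m r y : Int} {c d : Nat}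
    (hr : pvCov x m r c) (hy : pvMd m y d) (hdc : d ≤ c + 1) :
    pvCov x m (PySem.Int.bor r (PySem.Int.band (r >>> d) y)) (c + d) := by
  intro i
  rw [pv_tb_bor, pv_tb_band, pv_tb_shiftRight, Bool.or_eq_true, Bool.and_eq_true,
    hr i, hr (d + i), hy i]
  constructor
  · rintro (⟨j, hj, hxj, hmj⟩ | ⟨⟨j, hj, hxj, hmj⟩, hmd⟩)
    · exact ⟨j, by omega, hxj, hmj⟩
    · refine ⟨d + j, by omega, ?_, ?_⟩
      · have : i + (d + j) = d + i + j := by omega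
        rw [this]; exact hxj
      · intro t ht
        by_cases htd : t < d
        · exact hmd t htd
        · have : i + t = d + i + (t - d) := by omega
          rw [this]
          exact hmj (t - d) (by omega)
  · rintro ⟨j, hj, hxj, hmj⟩
    by_cases hjc : j ≤ c
    · exact Or.inl ⟨j, hjc, hxj, hmj⟩
    · refine Or.inr ⟨⟨j - d, by omega, ?_, ?_⟩, fun t ht => hmj t (by omega)⟩
      · have : d + i + (j - d) = i + j := by omega
        rw [this]; exact hxj
      · intro t ht
        have : d + i + t = i + (d + t) := by omega
        rw [this]
        exact hmj (d + t) (by omega)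

-- ---------- phase 1, A's side: the temp chain ----------

def pvGA (m : Int) (st : Int × Int) : Int × Int :=
  (PySem.Int.band (st.1 >>> (1 : Nat)) m,
   PySem.Int.bor st.2 (PySem.Int.band (st.1 >>> (1 : Nat)) m))

-- the running temp carries exactly the distance-k and distance-(k+1) source bits
def pvTP (x m t : Int) (k : Nat) : Prop :=
  ∀ i, t.testBit i = true ↔ (pvTm x m i k ∨ pvTm x m i (k + 1))

theorem pvTm_up {x m : Int} {i k : Nat} :
    (pvTm x m (1 + i) k ∧ m.testBit i = true) ↔ pvTm x m i (k + 1) := by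
  have e1 : i + (k + 1) = 1 + i + k := by omega
  have e2 : 1 + i + k = i + (k + 1) := by omega
  constructor
  · rintro ⟨⟨hx, hm⟩, hmi⟩
    refine ⟨by rw [e1]; exact hx, ?_⟩
    intro t ht
    cases t with
    | zero => simpa using hmi
    | succ t' =>
      have e3 : i + (t' + 1) = 1 + i + t' := by omega
      rw [e3]
      exact hm t' (by omega)
  · rintro ⟨hx, hm⟩
    refine ⟨⟨by rw [e2]; exact hx, ?_⟩, by simpa using hm 0 (by omega)⟩
    intro t ht
    have e3 : 1 + i + t = i + (t + 1) := by omega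
    rw [e3]
    exact hm (t + 1) (by omega)

theorem pvTP_step {x m t : Int} {k : Nat} (h : pvTP x m t k) :
    pvTP x m (PySem.Int.band (t >>> (1 : Nat)) m) (k + 1) := by
  intro i
  rw [pv_tb_band, pv_tb_shiftRight, Bool.and_eq_true, h (1 + i)]
  constructor
  · rintro ⟨hd, hmi⟩
    rcases hd with hd | hd
    · exact Or.inl (pvTm_up.mp ⟨hd, hmi⟩)
    · exact Or.inr (pvTm_up.mp ⟨hd, hmi⟩)
  · rintro (hd | hd)
    · obtain ⟨h1, h2⟩ := pvTm_up.mpr hd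
      exact ⟨Or.inl h1, h2⟩
    · obtain ⟨h1, h2⟩ := pvTm_up.mpr hd
      exact ⟨Or.inr h1, h2⟩

theorem pvCov_or_temp {x m b t : Int} {k : Nat}
    (hb : pvCov x m b (k + 1)) (ht : pvTP x m t (k + 1)) :
    pvCov x m (PySem.Int.bor b t) (k + 2) := by
  intro i
  rw [pv_tb_bor, Bool.or_eq_true, hb i, ht i]
  constructor
  · rintro (⟨j, hj, hT⟩ | hT | hT)
    · exact ⟨j, by omega, hT⟩
    · exact ⟨k + 1, by omega, hT⟩
    · exact ⟨k + 2, by omega, hT⟩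
  · rintro ⟨j, hj, hT⟩
    by_cases hjk : j ≤ k + 1
    · exact Or.inl ⟨j, hjk, hT⟩
    · have : j = k + 2 := by omega
      subst this
      exact Or.inr (Or.inr hT)

theorem pvTP_init (x m : Int) :
    pvTP x m (PySem.Int.bor x (PySem.Int.band (x >>> (1 : Nat)) m)) 0 := by
  intro i
  rw [pv_tb_bor, pv_tb_band, pv_tb_shiftRight, Bool.or_eq_true, Bool.and_eq_true]
  have e1 : i + 1 = 1 + i := by omega
  have e2 : 1 + i = i + 1 := by omega
  constructor
  · rintro (h | ⟨h1, h2⟩)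
    · exact Or.inl ⟨by simpa using h, by omega⟩
    · refine Or.inr ⟨by rw [e1]; exact h1, ?_⟩
      intro t ht
      interval_cases t
      simpa using h2
  · rintro (⟨h, -⟩ | ⟨h1, h2⟩)
    · exact Or.inl (by simpa using h)
    · refine Or.inr ⟨by rw [e2]; exact h1, by simpa using h2 0 (by omega)⟩

theorem pvCov_init (x m : Int) :
    pvCov x m (PySem.Int.bor x (PySem.Int.band (x >>> (1 : Nat)) m)) 1 := by
  intro i
  rw [(pvTP_init x m) i]
  constructor
  · rintro (h | h)
    · exact ⟨0, by omega, h⟩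
    · exact ⟨1, by omega, h⟩
  · rintro ⟨j, hj, hT⟩
    interval_cases j
    · exact Or.inl hT
    · exact Or.inr hT

theorem pvGA_iter (x m : Int) :
    ∀ k : Nat,
      pvTP x m ((pvGA m)^[k] (PySem.Int.bor x (PySem.Int.band (x >>> (1 : Nat)) m),
        PySem.Int.bor x (PySem.Int.band (x >>> (1 : Nat)) m))).1 k ∧
      pvCov x m ((pvGA m)^[k] (PySem.Int.bor x (PySem.Int.band (x >>> (1 : Nat)) m),
        PySem.Int.bor x (PySem.Int.band (x >>> (1 : Nat)) m))).2 (k + 1) := by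
  intro k
  induction k with
  | zero => exact ⟨pvTP_init x m, pvCov_init x m⟩
  | succ k ih =>
    obtain ⟨h1, h2⟩ := ih
    rw [Function.iterate_succ_apply']
    exact ⟨pvTP_step h1, pvCov_or_temp h2 (pvTP_step h1)⟩

theorem pv_foldl_const {α : Type} (g : α → α) :
    ∀ (l : List Int) (st : α), l.foldl (fun st _ => g st) st = g^[l.length] st := by
  intro l
  induction l with
  | nil => intro st; rfl
  | cons a l ih =>
    intro st
    simp only [List.foldl_cons, List.length_cons, ih]
    rw [Function.iterate_succ_apply]

-- ---------- phase 1, B's side: doubling and remainder loops ----------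

theorem pvDbl_inv (x m s : Int) :
    ∀ (f : Nat) (r md cov d : Int),
      pvCov x m r cov.toNat → pvMd m md d.toNat → 1 ≤ d → cov = d - 1 → cov ≤ s →
      pvCov x m (pvDbl s f (r, md, cov, d)).1 (pvDbl s f (r, md, cov, d)).2.2.1.toNat ∧
      pvMd m (pvDbl s f (r, md, cov, d)).2.1 (pvDbl s f (r, md, cov, d)).2.2.2.toNat ∧
      1 ≤ (pvDbl s f (r, md, cov, d)).2.2.2 ∧
      (pvDbl s f (r, md, cov, d)).2.2.1 = (pvDbl s f (r, md, cov, d)).2.2.2 - 1 ∧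
      (pvDbl s f (r, md, cov, d)).2.2.1 ≤ s ∧
      (s < (pvDbl s f (r, md, cov, d)).2.2.1 + (pvDbl s f (r, md, cov, d)).2.2.2 ∨
        (2 : Int) ^ f * d ≤ (pvDbl s f (r, md, cov, d)).2.2.2) := by
  intro f
  induction f with
  | zero =>
    intro r md cov d h1 h2 h3 h4 h5
    refine ⟨h1, h2, h3, h4, h5, Or.inr ?_⟩
    show (2 : Int) ^ 0 * d ≤ d
    simp
  | succ f ih =>
    intro r md cov d h1 h2 h3 h4 h5
    simp only [pvDbl]
    by_cases hc : cov + d ≤ s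
    · rw [if_pos hc, pv_shl_one d]
      have hdn : d.toNat = cov.toNat + 1 := by omega
      have hcd : (cov + d).toNat = cov.toNat + d.toNat := by omega
      have hr' : pvCov x m (PySem.Int.bor r (PySem.Int.band (r >>> d.toNat) md)) (cov + d).toNat := by
        rw [hcd]
        have := pvCov_chunk h1 h2 (by omega)
        -- pvCov_chunk gives exponent c + d; here c = cov.toNat
        simpa [Nat.add_comm] using this
      have hmd' : pvMd m (PySem.Int.band md (md >>> d.toNat)) (2 * d).toNat := by
        have := pvMd_band_shift h2 h2
        have h2d : (2 * d).toNat = d.toNat + d.toNat := by omega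
        rwa [h2d]
      have := ih (PySem.Int.bor r (PySem.Int.band (r >>> d.toNat) md))
        (PySem.Int.band md (md >>> d.toNat)) (cov + d) (2 * d) hr' hmd' (by omega) (by omega) hc
      refine ⟨this.1, this.2.1, this.2.2.1, this.2.2.2.1, this.2.2.2.2.1, ?_⟩
      rcases this.2.2.2.2.2 with h | h
      · exact Or.inl h
      · right
        calc (2:Int) ^ (f + 1) * d = 2 ^ f * (2 * d) := by ring
          _ ≤ _ := h
    · rw [if_neg hc]
      refine ⟨h1, h2, h3, h4, h5, Or.inl ?_⟩
      show s < cov + d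
      omega

theorem pvRem_inv (m : Int) :
    ∀ (f : Nat) (rem md dd mrem shift : Int),
      0 < rem → rem.toNat ≤ f → pvMd m md dd.toNat → pvMd m mrem shift.toNat →
      1 ≤ dd → 0 ≤ shift →
      pvMd m (pvRem f rem md dd mrem shift).1 (pvRem f rem md dd mrem shift).2.toNat ∧
      (pvRem f rem md dd mrem shift).2 = shift + rem * dd := by
  intro f
  induction f with
  | zero => intro rem md dd mrem shift h1 h2 _ _ _ _; omega
  | succ f ih =>
    intro rem md dd mrem shift hrem hf hmd hmrem hdd hshift
    simp only [pvRem]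
    rw [if_pos hrem]
    have hb1 : PySem.Int.band rem 1 = PySem.Int.mod rem 2 := PySem.Int.band_one rem
    have hmod : PySem.Int.mod rem 2 = rem % 2 := PySem.Int.mod_eq_emod_of_pos (by omega)
    have hrr : rem >>> (1 : Nat) = ((rem.toNat / 2 : Nat) : Int) :=
      pv_shr_one_nonneg rem (by omega)
    -- the updated (mrem, shift) pair
    have hp : ∀ p : Int × Int,
        p = (if PySem.Int.band rem 1 ≠ 0 then
              (PySem.Int.band mrem (md >>> shift.toNat), shift + dd) else (mrem, shift)) →
        pvMd m p.1 p.2.toNat ∧ p.2 = shift + (rem % 2) * dd ∧ 0 ≤ p.2 := by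
      intro p hpdef
      by_cases hodd : PySem.Int.band rem 1 ≠ 0
      · rw [if_pos hodd] at hpdef
        subst hpdef
        have hmod1 : rem % 2 = 1 := by
          rw [hb1, hmod] at hodd; omega
        refine ⟨?_, by rw [hmod1]; ring_nf, by omega⟩
        have := pvMd_band_shift hmrem hmd
        have hsd : (shift + dd).toNat = shift.toNat + dd.toNat := by omega
        rwa [hsd]
      · rw [if_neg hodd] at hpdef
        subst hpdef
        have hmod0 : rem % 2 = 0 := by
          rw [hb1, hmod] at hodd
          simp only [ne_eq, not_not] at hodd
          omega
        exact ⟨hmrem, by rw [hmod0]; ring_nf, hshift⟩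
    obtain ⟨hp1, hp2, hp3⟩ := hp _ rfl
    by_cases hr' : rem >>> (1 : Nat) > 0
    · rw [if_pos hr']
      have hr'pos : (0:Int) < ((rem.toNat / 2 : Nat) : Int) := by rw [← hrr]; exact hr'
      have hmd2 : pvMd m (PySem.Int.band md (md >>> dd.toNat)) (dd <<< (1 : Nat)).toNat := by
        have := pvMd_band_shift hmd hmd
        have h2d : (dd <<< (1 : Nat)).toNat = dd.toNat + dd.toNat := by
          rw [pv_shl_one]; omega
        rwa [h2d]
      have := ih (rem >>> (1 : Nat)) _ _ _ _ hr'
        (by rw [hrr]; simp only [Int.toNat_natCast]; omega)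
        hmd2 hp1 (by rw [pv_shl_one]; omega) hp3
      refine ⟨this.1, ?_⟩
      rw [this.2, hp2, hrr, pv_shl_one]
      have h2q : rem = 2 * ((rem.toNat / 2 : Nat) : Int) + rem % 2 := by omega
      linear_combination (-dd) * h2q
    · rw [if_neg hr']
      have : rem = 1 := by
        rw [hrr] at hr'
        simp only [not_lt] at hr'
        omega
      subst this
      refine ⟨hp1, by rw [hp2]; norm_num⟩

-- ---------- phase 2 shared: the per-slot terms ----------

def pvTerm (v s base : Int) (k : Nat) : Int :=
  if PySem.Int.band (v >>> (base + k * s).toNat) 1 ≠ 0 then ((1 <<< k : Nat) : Int) else 0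

def pvF (v s base : Int) : Nat → Int
  | 0 => 0
  | k + 1 => PySem.Int.bor (pvF v s base k) (pvTerm v s base k)

theorem pv_loopA_eq (v s dl base N : Int) (hs : 1 ≤ s)
    (hdl1 : (dl - 1) * s < N) (hdl2 : N ≤ dl * s) (hbase : base = N - 1 - (dl - 1) * s) :
    ∀ (mrem : Nat) (fuel : Nat) (acc : Int), (mrem : Int) ≤ dl → mrem ≤ fuel →
    (pvLoopA v s dl fuel (N - (dl - mrem) * s) (dl - mrem) acc).1
      = PySem.Int.bor acc (pvF v s base mrem) := by
  intro mrem
  induction mrem with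
  | zero =>
    intro fuel acc _ _
    simp only [Nat.cast_zero]
    have hle : ¬ (N - (dl - 0) * s > 0) := by
      simp only [Int.sub_zero]
      omega
    cases fuel with
    | zero => simp [pvLoopA, pvF, PySem.Int.bor_zero]
    | succ f =>
      simp only [pvLoopA]
      rw [if_neg hle]
      simp [pvF, PySem.Int.bor_zero]
  | succ k ih =>
    intro fuel acc hmd hf
    obtain ⟨f, rfl⟩ : ∃ f, fuel = f + 1 := ⟨fuel - 1, by omega⟩
    have hbase0 : 0 ≤ base := by
      have := Int.le_sub_one_of_lt hdl1
      omega
    have hipos : N - (dl - (k + 1 : Nat)) * s > 0 := by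
      push_cast
      have hk : (k : Int) * s ≥ 0 := by positivity
      have : N - (dl - ((k:Int) + 1)) * s = base + 1 + (k:Int) * s := by rw [hbase]; ring
      omega
    rw [pvLoopA, if_pos hipos]
    have hidx : (N - (dl - (k + 1 : Nat)) * s - 1).toNat = (base + (k : Nat) * s).toNat := by
      congr 1
      push_cast
      rw [hbase]; ring
    have hout : (dl - (dl - (k + 1 : Nat)) - 1).toNat = k := by
      push_cast
      omega
    have hnext_i : N - (dl - (k + 1 : Nat)) * s - s = N - (dl - (k : Nat)) * s := by
      push_cast; ring
    have hnext_c : dl - (k + 1 : Nat) + 1 = dl - (k : Nat) := by push_cast; ring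
    rw [hidx, hout, hnext_i, hnext_c]
    have hacc' :
        (if PySem.Int.band (v >>> (base + (k : Nat) * s).toNat) 1 ≠ 0 then
            PySem.Int.bor acc ((1 <<< k : Nat) : Int) else acc)
          = PySem.Int.bor acc (pvTerm v s base k) := by
      unfold pvTerm
      split_ifs with h
      · rfl
      · rw [PySem.Int.bor_zero]
    rw [hacc']
    rw [ih f _ (by push_cast at hmd ⊢; omega) (by omega)]
    show _ = PySem.Int.bor acc (PySem.Int.bor (pvF v s base k) (pvTerm v s base k))
    apply pv_tb_ext; intro i
    simp only [pv_tb_bor]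
    cases acc.testBit i <;> cases (pvTerm v s base k).testBit i <;>
      cases (pvF v s base k).testBit i <;> rfl

-- ---------- phase 2, B's side: the shift-consuming fold ----------

theorem pv_foldW (v s base : Int) (hbase : 0 ≤ base) (hs : 1 ≤ s) :
    ∀ K : Nat,
      (PySem.List.pyRange 0 (K : Int) 1).foldl
        (fun (st : Int × Int) t =>
          (st.1 >>> s.toNat,
           if PySem.Int.band st.1 1 ≠ 0 then PySem.Int.bor st.2 ((1 <<< t.toNat : Nat) : Int)
           else st.2))
        (v >>> base.toNat, 0)
      = (v >>> (base + K * s).toNat, pvF v s base K) := by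
  intro K
  induction K with
  | zero => simp [pvF, PySem.List.pyRange_one_eq_nil]
  | succ k ih =>
    have hsplit : PySem.List.pyRange 0 ((k + 1 : Nat) : Int) 1
        = PySem.List.pyRange 0 (k : Nat) 1 ++ [(k : Int)] := by
      have := PySem.List.pyRange_one_succ_right (a := 0) (b := (k : Int)) (by positivity)
      push_cast
      exact this
    rw [hsplit, List.foldl_append, ih]
    simp only [List.foldl_cons, List.foldl_nil]
    have hw : (v >>> (base + (k : Nat) * s).toNat) >>> s.toNat
        = v >>> (base + ((k : Nat) + 1) * s).toNat := by
      rw [pv_shiftRight_add]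
      congr 1
      have hkk : (0:Int) ≤ (k : Nat) * s := by positivity
      have : base + ((k:Int) + 1) * s = (base + (k:Int) * s) + s := by ring
      rw [this]
      omega
    have hcond : pvF v s base (k + 1)
        = (if PySem.Int.band ((v >>> (base + (k : Nat) * s).toNat)) 1 ≠ 0 then
            PySem.Int.bor (pvF v s base k) ((1 <<< ((k : Int)).toNat : Nat) : Int)
           else pvF v s base k) := by
      show PySem.Int.bor (pvF v s base k) (pvTerm v s base k) = _
      unfold pvTerm
      split_ifs with h
      · simp
      · rw [PySem.Int.bor_zero]
    rw [Prod.mk.injEq]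
    constructor
    · rw [hw]; push_cast; ring_nf
    · rw [hcond]

-- ---------- hamming weight = bitCount ----------

theorem pv_and_two_mul_pred (k : Nat) (hk : 0 < k) :
    (2 * k) &&& (2 * k - 1) = 2 * (k &&& (k - 1)) := by
  apply Nat.eq_of_testBit_eq; intro i
  cases i with
  | zero =>
    simp only [Nat.testBit_zero]
    have h1 : (2 * k) % 2 = 0 := by omega
    have h2 : (2 * (k &&& (k - 1))) % 2 = 0 := by omega
    have h3 := pv_and_mod_two (2 * k) (2 * k - 1)
    rw [h1] at h3
    simp [h2, h3]
  | succ i =>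
    simp only [Nat.testBit_add_one]
    rw [Nat.and_div_two]
    have h1 : (2 * k) / 2 = k := by omega
    have h2 : (2 * k - 1) / 2 = k - 1 := by omega
    have h3 : (2 * (k &&& (k - 1))) / 2 = k &&& (k - 1) := by omega
    rw [h1, h2, h3, Nat.testBit_and]

theorem pv_odd_and_pred (k : Nat) : (2 * k + 1) &&& (2 * k) = 2 * k := by
  apply Nat.eq_of_testBit_eq; intro i
  cases i with
  | zero =>
    simp only [Nat.testBit_zero]
    have h1 : (2 * k) % 2 = 0 := by omega
    have h3 := pv_and_mod_two (2 * k + 1) (2 * k)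
    rw [h1] at h3
    simp [h1, h3]
  | succ i =>
    simp only [Nat.testBit_add_one]
    rw [Nat.and_div_two]
    have h1 : (2 * k + 1) / 2 = k := by omega
    have h2 : (2 * k) / 2 = k := by omega
    rw [h1, h2, Nat.testBit_and, Bool.and_self]

theorem pv_bc_two_mul (k : Nat) : PySem.Int.bitCount (2 * k : Nat) = PySem.Int.bitCount (k : Nat) := by
  rcases Nat.eq_zero_or_pos k with h | h
  · subst h; rfl
  · have := PySem.Int.bitCount_natCast (m := 2 * k) (by omega)
    have h1 : (2 * k) % 2 = 0 := by omega
    have h2 : (2 * k) / 2 = k := by omega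
    rw [h1, h2] at this; simpa using this

theorem pv_bc_odd (k : Nat) : PySem.Int.bitCount (2 * k + 1 : Nat) = PySem.Int.bitCount (k : Nat) + 1 := by
  have := PySem.Int.bitCount_natCast (m := 2 * k + 1) (by omega)
  have h1 : (2 * k + 1) % 2 = 1 := by omega
  have h2 : (2 * k + 1) / 2 = k := by omega
  rw [h1, h2] at this; omega

theorem pv_bc_and_pred (m : Nat) (hm : 0 < m) :
    PySem.Int.bitCount ((m &&& (m - 1) : Nat)) + 1 = PySem.Int.bitCount (m : Nat) := by
  induction m using Nat.strong_induction_on with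
  | _ m ih =>
    rcases Nat.even_or_odd m with ⟨k, hk⟩ | ⟨k, hk⟩
    · have hk0 : 0 < k := by omega
      have hm2 : m = 2 * k := by omega
      subst hm2
      rw [pv_and_two_mul_pred k hk0, pv_bc_two_mul, pv_bc_two_mul]
      exact ih k (by omega) hk0
    · have hm2 : m = 2 * k + 1 := by omega
      subst hm2
      have h1 : 2 * k + 1 - 1 = 2 * k := by omega
      rw [h1, pv_odd_and_pred, pv_bc_two_mul, pv_bc_odd]

theorem pvF_nonneg (v s base : Int) : ∀ K, 0 ≤ pvF v s base K := by
  intro K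
  induction K with
  | zero => simp [pvF]
  | succ k ih =>
    show 0 ≤ PySem.Int.bor _ _
    have ht : 0 ≤ pvTerm v s base k := by
      unfold pvTerm; split_ifs <;> positivity
    rw [PySem.Int.bor_of_nonneg ih ht]
    positivity

theorem pv_hw_eq : ∀ (fuel : Nat) (x : Int), 0 ≤ x → x.toNat ≤ fuel →
    pvHwA fuel x = (PySem.Int.bitCount x : Int) := by
  intro fuel
  induction fuel with
  | zero =>
    intro x hx hf
    have : x = 0 := by omega
    subst this; simp [pvHwA]
  | succ f ih =>
    intro x hx hf
    by_cases h0 : x = 0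
    · subst h0; simp [pvHwA]
    · have hxpos : 0 < x := lt_of_le_of_ne hx (Ne.symm h0)
      have hb : PySem.Int.band x (x - 1) = ((x.toNat &&& (x.toNat - 1) : Nat) : Int) := by
        have := PySem.Int.band_of_nonneg (a := x) (b := x - 1) hx (by omega)
        rw [this]
        congr 2
        omega
      have hle : (x.toNat &&& (x.toNat - 1)) ≤ x.toNat - 1 := Nat.and_le_right
      have hih := ih ((x.toNat &&& (x.toNat - 1) : Nat) : Int) (by positivity) (by simp; omega)
      simp only [pvHwA, h0, ne_eq, not_false_iff, if_true, hb, hih]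
      have hx' : x = ((x.toNat : Nat) : Int) := by omega
      rw [hx']
      have := pv_bc_and_pred x.toNat (by omega)
      simp only [Int.toNat_natCast]
      omega

theorem pv_bor_zero_left (a : Int) : PySem.Int.bor 0 a = a := by
  rw [PySem.Int.bor_comm, PySem.Int.bor_zero]

-- ===== VERDICT (by name: the statement is the Claim_ definition above) =====
theorem pvCov_unique {x m a b : Int} {c : Nat}
    (ha : pvCov x m a c) (hb : pvCov x m b c) : a = b := by
  apply pv_tb_ext
  intro i
  have h1 := ha i
  have h2 := hb i
  by_cases h : ∃ j ≤ c, pvTm x m i j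
  · rw [h1.mpr h, h2.mpr h]
  · cases hA : a.testBit i
    · cases hB : b.testBit i
      · rfl
      · exact absurd (h2.mp hB) h
    · exact absurd (h1.mp hA) h

-- ===== VERDICT (by name: the statement is the Claim_ definition above) =====
theorem get_support_from_vector_spec : Claim_equal_get_support_from_vector := by
  intro x s m lom _hdom hpre
  unfold Pre_get_support_from_vector at hpre
  unfold Spec_get_support_from_vector
  rcases hpre with hs | ⟨hneg, hzero⟩
  case inr =>
    -- slot size ≤ -1 and the once-smeared masked bitset is 0: both sides return [0, 0]
    unfold get_support_from_vector get_support_from_vector_alt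
    dsimp only []
    rw [PySem.List.pyRange_one_eq_nil (by omega : s - 1 ≤ 0)]
    simp only [List.foldl_nil]
    rw [hzero, PySem.Int.bitLength_zero]
    have hst : pvDbl s (s.toNat + 1) (x, m, 0, 1) = (x, m, 0, 1) := by
      have h0 : s.toNat = 0 := by omega
      rw [h0]
      simp only [pvDbl]
      rw [if_neg (by omega)]
    rw [hst]
    have hcond : ¬ (s - ((x, m, 0, 1) : Int × Int × Int × Int).2.2.1 > 0) := by
      show ¬ (s - 0 > 0)
      omega
    rw [if_neg hcond]
    have hmB : PySem.Int.band x lom = 0 := by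
      apply pv_tb_ext; intro i
      have hbit := congrArg (fun z => Int.testBit z i) hzero
      simp only [pv_tb_band, pv_tb_bor] at hbit
      have h0 : (0 : Int).testBit i = false := by simp [Int.testBit]
      rw [h0] at hbit
      simp only [pv_tb_band, h0]
      cases hx : x.testBit i <;> cases hl : lom.testBit i <;> simp_all
    rw [hmB, PySem.Int.bitLength_zero]
    simp [pvLoopA, pvHwA]
  case inl =>
  unfold get_support_from_vector get_support_from_vector_alt
  dsimp only []
  -- ---- phase 1, A: the fold is the iterate of pvGA, hence pvCov at s.toNat ----
  have hlam : (fun (st : Int × Int) (_ : Int) =>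
        let t := PySem.Int.band (st.1 >>> (1 : Nat)) m
        (t, PySem.Int.bor st.2 t)) = (fun st _ => pvGA m st) := rfl
  have hfold : (PySem.List.pyRange 0 (s - 1) 1).foldl
      (fun (st : Int × Int) _ =>
        let t := PySem.Int.band (st.1 >>> (1 : Nat)) m
        (t, PySem.Int.bor st.2 t))
      (PySem.Int.bor x (PySem.Int.band (x >>> (1 : Nat)) m),
       PySem.Int.bor x (PySem.Int.band (x >>> (1 : Nat)) m))
      = (pvGA m)^[(s - 1).toNat] (PySem.Int.bor x (PySem.Int.band (x >>> (1 : Nat)) m),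
          PySem.Int.bor x (PySem.Int.band (x >>> (1 : Nat)) m)) := by
    rw [hlam, pv_foldl_const]
    have hlen : (PySem.List.pyRange 0 (s - 1) 1).length = (s - 1).toNat := by
      have := PySem.List.length_pyRange_one 0 (s - 1)
      simp only [Int.sub_zero] at this
      exact this
    rw [hlen]
  rw [hfold]
  have hcovA : pvCov x m ((pvGA m)^[(s - 1).toNat]
      (PySem.Int.bor x (PySem.Int.band (x >>> (1 : Nat)) m),
       PySem.Int.bor x (PySem.Int.band (x >>> (1 : Nat)) m))).2 s.toNat := by
    have := (pvGA_iter x m (s - 1).toNat).2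
    have he : (s - 1).toNat + 1 = s.toNat := by omega
    rwa [he] at this
  -- ---- phase 1, B: the doubling pipeline is pvCov at s.toNat ----
  have hmd1 : pvMd m m ((1 : Int)).toNat := by
    have : ((1 : Int)).toNat = 1 := rfl
    rw [this]; exact pvMd_self m
  have hinv := pvDbl_inv x m s (s.toNat + 1) x m 0 1 (pvCov_refl x m) hmd1
    (by omega) (by omega) (by omega)
  obtain ⟨hcovB0, hmdB, hd1, hcd, hcovs, hlast⟩ := hinv
  set st := pvDbl s (s.toNat + 1) (x, m, 0, 1) with hstdef
  have hexit : s < st.2.2.1 + st.2.2.2 := by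
    rcases hlast with h | h
    · exact h
    · -- d grew past 2^(s.toNat+1) > s + 1, so cov = d - 1 already exceeds s
      have hn : s.toNat + 1 < 2 ^ (s.toNat + 1) := Nat.lt_two_pow_self
      have hcast : ((2 ^ (s.toNat + 1) : Nat) : Int) = (2 : Int) ^ (s.toNat + 1) := by
        push_cast; rfl
      have hsnn : (s : Int) = ((s.toNat : Nat) : Int) := by omega
      have : (s : Int) + 2 ≤ (2 : Int) ^ (s.toNat + 1) := by
        rw [← hcast, hsnn]
        exact_mod_cast hn
      omega
  have hcovB : ∀ rB, rB = (if s - st.2.2.1 > 0 then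
      PySem.Int.bor st.1 (PySem.Int.band
        (st.1 >>> (pvRem ((s - st.2.2.1).toNat + 1) (s - st.2.2.1) m 1 (-1) 0).2.toNat)
        (pvRem ((s - st.2.2.1).toNat + 1) (s - st.2.2.1) m 1 (-1) 0).1)
    else st.1) → pvCov x m rB s.toNat := by
    intro rB hrB
    by_cases hR : s - st.2.2.1 > 0
    · rw [if_pos hR] at hrB
      have hmd0 : pvMd m (-1) ((0 : Int)).toNat := by
        have h0 : ((0 : Int)).toNat = 0 := rfl
        rw [h0]
        exact pvMd_neg_one m
      have hrem := pvRem_inv m ((s - st.2.2.1).toNat + 1) (s - st.2.2.1) m 1 (-1) 0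
        hR (by omega) hmd1 hmd0 (by omega) (by omega)
      obtain ⟨hp1, hp2⟩ := hrem
      have hp2' : (pvRem ((s - st.2.2.1).toNat + 1) (s - st.2.2.1) m 1 (-1) 0).2
          = s - st.2.2.1 := by rw [hp2]; ring
      have hchunk := pvCov_chunk hcovB0 (by rwa [hp2'] at hp1) (by omega)
      rw [hrB, hp2']
      have he : st.2.2.1.toNat + (s - st.2.2.1).toNat = s.toNat := by omega
      rwa [he] at hchunk
    · rw [if_neg hR] at hrB
      rw [hrB]
      have he : st.2.2.1.toNat = s.toNat := by omega
      rwa [he] at hcovB0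
  have hAB : ((pvGA m)^[(s - 1).toNat]
      (PySem.Int.bor x (PySem.Int.band (x >>> (1 : Nat)) m),
       PySem.Int.bor x (PySem.Int.band (x >>> (1 : Nat)) m))).2
      = (if s - st.2.2.1 > 0 then
          PySem.Int.bor st.1 (PySem.Int.band
            (st.1 >>> (pvRem ((s - st.2.2.1).toNat + 1) (s - st.2.2.1) m 1 (-1) 0).2.toNat)
            (pvRem ((s - st.2.2.1).toNat + 1) (s - st.2.2.1) m 1 (-1) 0).1)
        else st.1) :=
    pvCov_unique hcovA (hcovB _ rfl)
  rw [← hAB]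
  -- ---- phase 2: both ports extract from the same masked value v ----
  set v := PySem.Int.band ((pvGA m)^[(s - 1).toNat]
      (PySem.Int.bor x (PySem.Int.band (x >>> (1 : Nat)) m),
       PySem.Int.bor x (PySem.Int.band (x >>> (1 : Nat)) m))).2 lom with hv
  set n := PySem.Int.bitLength v with hn
  by_cases hn0 : n = 0
  · rw [if_pos hn0, hn0]
    simp [pvLoopA, pvHwA]
  · rw [if_neg hn0]
    set N : Int := ((n : Nat) : Int) with hN
    have hN1 : 1 ≤ N := by
      have : 1 ≤ n := Nat.one_le_iff_ne_zero.mpr hn0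
      omega
    set dl : Int := -(PySem.Int.floordiv (-N) s) with hdl
    have hdlb := (PySem.Int.neg_floordiv_neg_eq_iff_of_pos (a := N) (b := s) (q := dl)
      (by omega)).mp rfl
    obtain ⟨hdl1, hdl2⟩ := hdlb
    have hdlpos : 1 ≤ dl := by
      by_contra hcon
      have hd0 : dl ≤ 0 := by omega
      have : dl * s ≤ 0 := mul_nonpos_of_nonpos_of_nonneg hd0 (by omega)
      omega
    have hdlN : dl ≤ N := by
      have h1 : (dl - 1) * 1 ≤ (dl - 1) * s :=
        mul_le_mul_of_nonneg_left hs (by omega)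
      have := Int.le_sub_one_of_lt hdl1
      omega
    set base : Int := N - 1 - (dl - 1) * s with hbase
    have hbase0 : 0 ≤ base := by
      have := Int.le_sub_one_of_lt hdl1
      omega
    have hfd : PySem.Int.floordiv (N - 1) s = dl - 1 := by
      rw [PySem.Int.floordiv_eq_iff_of_pos (by omega)]
      constructor
      · have := Int.le_sub_one_of_lt hdl1; omega
      · have : (dl - 1 + 1) * s = dl * s := by ring
        omega
    have hmod : PySem.Int.mod (N - 1) s = base := by
      have := PySem.Int.floordiv_mul_add_mod (N - 1) s
      rw [hfd] at this
      omega
    -- B's ceiling division agrees with A's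
    have hslots : PySem.Int.floordiv (N + s - 1) s = dl := by
      rw [PySem.Int.floordiv_eq_iff_of_pos (by omega)]
      have e1 : (dl - 1) * s = dl * s - s := by ring
      have e2 : (dl + 1) * s = dl * s + s := by ring
      constructor <;> omega
    -- A's extraction loop
    have hloopA := pv_loopA_eq v s dl base N hs hdl1 hdl2 rfl dl.toNat n 0
      (by omega) (by omega)
    have hc0 : dl - ((dl.toNat : Nat) : Int) = 0 := by omega
    rw [hc0] at hloopA
    simp only [zero_mul, sub_zero] at hloopA
    rw [pv_bor_zero_left] at hloopA
    -- B's extraction fold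
    have hfoldW := pv_foldW v s base hbase0 hs dl.toNat
    have hdlc : ((dl.toNat : Nat) : Int) = dl := by omega
    rw [hdlc] at hfoldW
    have hiN : ((PySem.Int.bitLength v : Nat) : Int) = N := rfl
    have hiNtoNat : N.toNat = n := by omega
    rw [hiNtoNat] at *
    rw [hmod, hslots, hfoldW]
    show [pvHwA (pvLoopA v s dl n N 0 0).1.toNat (pvLoopA v s dl n N 0 0).1,
          (pvLoopA v s dl n N 0 0).1]
        = [((PySem.Int.bitCount (pvF v s base dl.toNat) : Nat) : Int), pvF v s base dl.toNat]
    rw [hloopA]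
    have hhw := pv_hw_eq (pvF v s base dl.toNat).toNat (pvF v s base dl.toNat)
      (pvF_nonneg v s base dl.toNat) le_rfl
    rw [hhw]
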